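-- pv_equiv track=rewrite | github.com/selavy/hash_tables | probe.py | sseq
-- ===== SOURCE A (Python) =====
-- def sseq(start, asize):
--     seq = [str(start)]
--     k = start
--     i = k % asize
--     last = start
--     step = 0
--     for _ in range(1000000):
--         step = step + 1
--         i = (i + step) % asize
--         if i == last:
--             break
--         seq.append(str(i))
--     return seq
-- ===== SOURCE B (Python) =====
-- def sseq(start, asize):
--     base = start % asize
--     def idx(m):
--         return (base + m * (m + 1) // 2) % asize
--     m0 = 1000001
--     for m in range(1, 1000001):
--         if idx(m) == start:
--             m0 = m
--             break
--     return [str(start)] + [str(idx(m)) for m in range(1, m0)]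
-- ===== Notes on version B (the rewrite author's own statement) =====
-- stated objective: alternative
-- what changed: B drops A's running (i, step) accumulators: it computes each probe index directly by the closed form (start%asize + m*(m+1)//2) % asize, first searching for the break point m0 and then emitting the list with a comprehension over range(1, m0).
import Mathlib
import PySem

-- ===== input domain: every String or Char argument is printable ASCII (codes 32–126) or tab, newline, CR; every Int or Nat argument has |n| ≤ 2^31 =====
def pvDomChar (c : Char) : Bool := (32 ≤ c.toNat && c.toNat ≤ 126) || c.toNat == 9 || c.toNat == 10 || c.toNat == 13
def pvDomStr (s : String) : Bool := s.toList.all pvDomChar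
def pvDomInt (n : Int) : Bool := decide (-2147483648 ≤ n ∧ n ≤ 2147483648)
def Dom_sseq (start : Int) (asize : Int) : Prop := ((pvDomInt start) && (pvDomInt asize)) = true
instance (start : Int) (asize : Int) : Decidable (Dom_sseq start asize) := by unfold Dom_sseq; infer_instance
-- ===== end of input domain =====

-- B replaces A's running (i, step) accumulators by a closed-form index (start%asize + m(m+1)//2) % asize,
-- split into a search for the break point followed by a comprehension (objective: alternative decomposition).

-- ===== PORT A =====
-- A's `for _ in range(1000000)` with break, threading (i, step, seq)
def sseqLoopA (start asize : Int) : Nat → Int → Int → List String → List String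
  | 0, _, _, seq => seq
  | n+1, i, step, seq =>
    let step' := step + 1
    let i' := PySem.Int.mod (i + step') asize
    if i' = start then seq
    else sseqLoopA start asize n i' step' (seq ++ [PySem.Int.toStr i'])

def sseq (start : Int) (asize : Int) : List String :=
  sseqLoopA start asize 1000000 (PySem.Int.mod start asize) 0 [PySem.Int.toStr start]

-- ===== PORT B =====
-- B's helper idx(m) = (base + m*(m+1)//2) % asize
def sseqIdx (base asize m : Int) : Int :=
  PySem.Int.mod (base + PySem.Int.floordiv (m * (m + 1)) 2) asize

-- B's first loop: first m (from 1) with idx m = start; falls through to 1000001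
def sseqFind (start base asize : Int) : Nat → Int → Int
  | 0, m => m
  | n+1, m => if sseqIdx base asize m = start then m else sseqFind start base asize n (m+1)

def sseq_alt (start : Int) (asize : Int) : List String :=
  let base := PySem.Int.mod start asize
  let m0 := sseqFind start base asize 1000000 1
  PySem.Int.toStr start :: (PySem.List.pyRange 1 m0 1).map (fun m => PySem.Int.toStr (sseqIdx base asize m))

-- ===== PRECONDITION & SPEC =====
-- asize = 0 makes the Python `%` raise ZeroDivisionError in both A and B, so it is outside Pre_.
def Pre_sseq (start : Int) (asize : Int) : Prop := asize ≠ 0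
instance (start : Int) (asize : Int) : Decidable (Pre_sseq start asize) := by unfold Pre_sseq; infer_instance
def pvWitness_sseq : Int × Int := (3, 7)

def Spec_sseq (start : Int) (asize : Int) (out : List String) : Prop := out = sseq_alt start asize
instance (start : Int) (asize : Int) (out : List String) : Decidable (Spec_sseq start asize out) := by unfold Spec_sseq; infer_instance

-- ===== CLAIM (what is proved, stated in full; the proofs are below) =====
def Claim_equal_sseq : Prop := ∀ (start : Int) (asize : Int), Dom_sseq start asize → Pre_sseq start asize → Spec_sseq start asize (sseq start asize)

-- ===== LEMMAS AND PROOFS =====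

theorem fmod_add_left (a b n : Int) : Int.fmod (Int.fmod a n + b) n = Int.fmod (a + b) n := by
  conv_rhs => rw [← Int.fmod_add_mul_fdiv a n]
  rw [add_right_comm, add_assoc, ← add_assoc, Int.add_mul_fmod_self_left]

-- triangular numbers via Python // : T(m+1) = T(m) + (m+1), for every integer m
theorem tri_succ (m : Int) :
    PySem.Int.floordiv ((m+1) * (m+1+1)) 2 = PySem.Int.floordiv (m * (m+1)) 2 + (m+1) := by
  show Int.fdiv _ _ = Int.fdiv _ _ + _
  have h2 : ∀ x : Int, Int.fdiv (2*x) 2 = x := fun x => Int.mul_fdiv_cancel_left _ (by norm_num)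
  rcases Int.even_or_odd m with ⟨k,hk⟩|⟨k,hk⟩ <;> subst hk
  · rw [show (k+k+1)*(k+k+1+1) = 2*((k+k+1)*(k+1)) by ring, h2,
        show (k+k)*(k+k+1) = 2*(k*(k+k+1)) by ring, h2]; ring
  · rw [show (2*k+1+1)*(2*k+1+1+1) = 2*((k+1)*(2*k+3)) by ring, h2,
        show (2*k+1)*(2*k+1+1) = 2*((2*k+1)*(k+1)) by ring, h2]; ring

-- A's next index from the closed form: idx(m+1) = (idx(m) + (m+1)) % asize
theorem idx_step (base asize m : Int) :
    PySem.Int.mod (sseqIdx base asize m + (m+1)) asize = sseqIdx base asize (m+1) := by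
  unfold sseqIdx
  show Int.fmod (Int.fmod _ _ + _) _ = _
  rw [fmod_add_left, tri_succ m]
  show Int.fmod _ _ = Int.fmod _ _
  ring_nf

theorem find_ge (start base asize : Int) : ∀ (n : Nat) (m : Int), m ≤ sseqFind start base asize n m
  | 0, m => le_refl m
  | n+1, m => by
    unfold sseqFind
    split
    · exact le_refl m
    · exact le_trans (by omega) (find_ge start base asize n (m+1))

-- main invariant: from state (idx m, m), A's loop appends exactly idx(m+1)…idx(m0-1)
theorem loopA_eq (start asize : Int) :
    ∀ (n : Nat) (m : Int) (seq : List String),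
      sseqLoopA start asize n (sseqIdx (PySem.Int.mod start asize) asize m) m seq
        = seq ++ (PySem.List.pyRange (m+1) (sseqFind start (PySem.Int.mod start asize) asize n (m+1)) 1).map
            (fun j => PySem.Int.toStr (sseqIdx (PySem.Int.mod start asize) asize j))
  | 0, m, seq => by
    simp [sseqLoopA, sseqFind, PySem.List.pyRange_one_eq_nil (le_refl (m+1))]
  | n+1, m, seq => by
    show (if PySem.Int.mod (sseqIdx (PySem.Int.mod start asize) asize m + (m+1)) asize = start then seq
          else sseqLoopA start asize n (PySem.Int.mod (sseqIdx (PySem.Int.mod start asize) asize m + (m+1)) asize) (m+1)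
                 (seq ++ [PySem.Int.toStr (PySem.Int.mod (sseqIdx (PySem.Int.mod start asize) asize m + (m+1)) asize)])) = _
    rw [idx_step (PySem.Int.mod start asize) asize m]
    show _ = seq ++ (PySem.List.pyRange (m+1)
        (if sseqIdx (PySem.Int.mod start asize) asize (m+1) = start then (m+1)
         else sseqFind start (PySem.Int.mod start asize) asize n (m+1+1)) 1).map _
    split
    · simp [PySem.List.pyRange_one_eq_nil (le_refl (m+1))]
    · rw [loopA_eq start asize n (m+1) _]
      have hge : m+1+1 ≤ sseqFind start (PySem.Int.mod start asize) asize n (m+1+1) :=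
        find_ge start (PySem.Int.mod start asize) asize n _
      conv_rhs => rw [PySem.List.pyRange_one_cons (show m+1 < sseqFind start (PySem.Int.mod start asize) asize n (m+1+1) by omega)]
      simp

theorem fmod_fmod (a n : Int) : Int.fmod (Int.fmod a n) n = Int.fmod a n := by
  have h := fmod_add_left a 0 n
  rwa [add_zero, add_zero] at h

theorem idx_zero (start asize : Int) :
    sseqIdx (PySem.Int.mod start asize) asize 0 = PySem.Int.mod start asize := by
  unfold sseqIdx
  show Int.fmod (Int.fmod start asize + Int.fdiv (0 * (0+1)) 2) asize = Int.fmod start asize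
  rw [show Int.fdiv (0 * (0+1)) 2 = 0 from rfl, add_zero, fmod_fmod]

-- ===== VERDICT (by name: the statement is the Claim_ definition above) =====
theorem sseq_spec : Claim_equal_sseq := by
  intro start asize _ _
  unfold Spec_sseq sseq sseq_alt
  have h0 := idx_zero start asize
  conv_lhs => rw [show (PySem.Int.mod start asize) = sseqIdx (PySem.Int.mod start asize) asize 0 from h0.symm]
  rw [loopA_eq start asize 1000000 0]
  simp
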